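-- pv_equiv track=rewrite | github.com/roman-kutlak/nlglib | nlg/qm.py | merge
-- ===== SOURCE A (Python) =====
-- def merge(i, j):
-- 	'''Return cube merge.  'X' is don't-care.  'None' if merge impossible.'''
-- 	s = ''
-- 	dif_cnt = 0
-- 	for a, b in zip(i, j):
-- 		if (a == 'X' or b == 'X') and a != b:
-- 			return None
-- 		elif a != b:
-- 			dif_cnt += 1
-- 			s += 'X'
-- 		else:
-- 			s += a
-- 		if dif_cnt > 1:
-- 			return None
-- 	return s
-- ===== SOURCE B (Python) =====
-- def merge(i, j):
--     '''Return cube merge.  'X' is don't-care.  'None' if merge impossible.'''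
--     n = min(len(i), len(j))
--     a, b = i[:n], j[:n]
--     if a == b:
--         return a
--     k = next(p for p in range(n) if a[p] != b[p])
--     if a[k+1:] != b[k+1:]:
--         return None
--     if a[k] == 'X' or b[k] == 'X':
--         return None
--     return a[:k] + 'X' + a[k+1:]
-- ===== Notes on version B (the rewrite author's own statement) =====
-- stated objective: faster
-- what changed: Replaces A's per-character counting scan (running difference counter with early exits) by a first-mismatch algorithm: truncate to the common length, return the string if equal, otherwise locate the first differing index and decide mergeability by one suffix-equality comparison, building the result by slicing around that index; whole-string comparisons and slices run at C speed instead of a Python char loop.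
import Mathlib
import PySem

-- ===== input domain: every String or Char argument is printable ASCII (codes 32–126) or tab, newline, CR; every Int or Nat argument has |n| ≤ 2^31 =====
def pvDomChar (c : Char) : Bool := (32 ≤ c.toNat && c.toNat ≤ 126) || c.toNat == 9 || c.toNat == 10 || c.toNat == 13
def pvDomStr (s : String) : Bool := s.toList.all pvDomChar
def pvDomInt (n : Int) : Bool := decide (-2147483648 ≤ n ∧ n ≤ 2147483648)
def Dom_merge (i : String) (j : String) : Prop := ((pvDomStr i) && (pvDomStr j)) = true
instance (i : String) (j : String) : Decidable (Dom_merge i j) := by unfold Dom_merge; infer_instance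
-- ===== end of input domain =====

-- B replaces A's counting scan by a different algorithm: locate the FIRST mismatch position,
-- then decide mergeability by a single suffix-equality comparison (no difference counter,
-- no per-position validation pass), and assemble the result by slicing around that position.

-- ===== PORT A =====
-- the for-loop over zip(i, j): accumulator s (as List Char), counter dif_cnt, early returns
def mergeLoopA : List (Char × Char) → List Char → Int → Option (List Char)
  | [], s, _ => some s
  | (a, b) :: rest, s, cnt =>
    if (a = 'X' ∨ b = 'X') ∧ a ≠ b then none
    else if a ≠ b then
      if cnt + 1 > 1 then none else mergeLoopA rest (s ++ ['X']) (cnt + 1)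
    else
      if cnt > 1 then none else mergeLoopA rest (s ++ [a]) cnt

def merge (i : String) (j : String) : Option String :=
  Option.map String.ofList (mergeLoopA (i.toList.zip j.toList) [] 0)

-- ===== PORT B =====
-- next(p for p in range(n) if a[p] != b[p]) : index of the first differing position
def firstMismatch : List Char → List Char → Nat
  | x :: xs, y :: ys => if x ≠ y then 0 else firstMismatch xs ys + 1
  | _, _ => 0

-- body of Source B after truncating both strings to the common length (lists of chars)
def mergeAltCore (a : List Char) (b : List Char) : Option (List Char) :=
  if a = b then some a
  else
    let k := firstMismatch a b
    if a.drop (k + 1) ≠ b.drop (k + 1) then none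
    else if a.getD k ' ' = 'X' ∨ b.getD k ' ' = 'X' then none
    else some (a.take k ++ 'X' :: a.drop (k + 1))

def merge_alt (i : String) (j : String) : Option String :=
  let n := min i.toList.length j.toList.length
  Option.map String.ofList (mergeAltCore (i.toList.take n) (j.toList.take n))

-- ===== PRECONDITION & SPEC =====
def Spec_merge (i : String) (j : String) (out : Option String) : Prop := out = merge_alt i j
instance (i : String) (j : String) (out : Option String) : Decidable (Spec_merge i j out) := by unfold Spec_merge; infer_instance

-- ===== CLAIM (what is proved, stated in full; the proofs are below) =====
def Claim_equal_merge : Prop := ∀ (i : String) (j : String), Dom_merge i j → Spec_merge i j (merge i j)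

-- ===== LEMMAS AND PROOFS =====

-- the differing pairs, the 'X'-test on them, A's failure condition, and the merged characters
def pvDiffs (l : List (Char × Char)) : List (Char × Char) := l.filter (fun p => p.1 != p.2)
def pvHasX (l : List (Char × Char)) : Bool := l.any (fun p => p.1 == 'X' || p.2 == 'X')
def pvBad (l : List (Char × Char)) (cnt : Int) : Bool :=
  pvHasX (pvDiffs l) || decide (cnt + ((pvDiffs l).length : Int) > 1)
def pvMerged (l : List (Char × Char)) : List Char :=
  l.map (fun p => if p.1 != p.2 then 'X' else p.1)

lemma pvDiffs_cons_eq {a b : Char} (h : a = b) (tl : List (Char × Char)) :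
    pvDiffs ((a, b) :: tl) = pvDiffs tl := by
  simp [pvDiffs, h]

lemma pvDiffs_cons_ne {a b : Char} (h : a ≠ b) (tl : List (Char × Char)) :
    pvDiffs ((a, b) :: tl) = (a, b) :: pvDiffs tl := by
  simp [pvDiffs, h]

lemma mergeLoopA_eq (l : List (Char × Char)) (s : List Char) (cnt : Int)
    (hcnt : cnt ≤ 1) :
    mergeLoopA l s cnt =
      if pvBad l cnt then none else some (s ++ pvMerged l) := by
  induction l generalizing s cnt with
  | nil =>
      have : pvBad [] cnt = false := by
        simp [pvBad, pvDiffs, pvHasX]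
        omega
      simp [mergeLoopA, this, pvMerged]
  | cons hd tl ih =>
      obtain ⟨a, b⟩ := hd
      by_cases hab : a = b
      · rw [show mergeLoopA ((a, b) :: tl) s cnt
            = if (a = 'X' ∨ b = 'X') ∧ a ≠ b then none
              else if a ≠ b then
                if cnt + 1 > 1 then none else mergeLoopA tl (s ++ ['X']) (cnt + 1)
              else
                if cnt > 1 then none else mergeLoopA tl (s ++ [a]) cnt from rfl]
        rw [if_neg (by tauto), if_neg (by tauto), if_neg (by omega), ih _ _ hcnt]
        have hbad : pvBad ((a, b) :: tl) cnt = pvBad tl cnt := by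
          rw [pvBad, pvBad, pvDiffs_cons_eq hab]
        have hm : pvMerged ((a, b) :: tl) = a :: pvMerged tl := by
          simp [pvMerged, hab]
        rw [hbad, hm]
        by_cases hc : pvBad tl cnt
        · rw [if_pos hc, if_pos hc]
        · rw [if_neg (by simp [hc]), if_neg (by simp [hc])]
          simp
      · by_cases hX : a = 'X' ∨ b = 'X'
        · rw [show mergeLoopA ((a, b) :: tl) s cnt
              = if (a = 'X' ∨ b = 'X') ∧ a ≠ b then none
                else if a ≠ b then
                  if cnt + 1 > 1 then none else mergeLoopA tl (s ++ ['X']) (cnt + 1)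
                else
                  if cnt > 1 then none else mergeLoopA tl (s ++ [a]) cnt from rfl]
          rw [if_pos ⟨hX, hab⟩]
          have hbad : pvBad ((a, b) :: tl) cnt = true := by
            rw [pvBad, pvDiffs_cons_ne hab]
            have : pvHasX ((a, b) :: pvDiffs tl) = true := by
              simp [pvHasX]
              tauto
            simp [this]
          rw [if_pos hbad]
        · rw [show mergeLoopA ((a, b) :: tl) s cnt
              = if (a = 'X' ∨ b = 'X') ∧ a ≠ b then none
                else if a ≠ b then
                  if cnt + 1 > 1 then none else mergeLoopA tl (s ++ ['X']) (cnt + 1)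
                else
                  if cnt > 1 then none else mergeLoopA tl (s ++ [a]) cnt from rfl]
          rw [if_neg (by tauto), if_pos hab]
          by_cases hc : cnt + 1 > 1
          · rw [if_pos hc]
            have hbad : pvBad ((a, b) :: tl) cnt = true := by
              simp only [pvBad, pvDiffs_cons_ne hab, Bool.or_eq_true, decide_eq_true_eq,
                List.length_cons]
              right
              push_cast
              omega
            rw [if_pos hbad]
          · rw [if_neg hc, ih _ _ (by omega)]
            have hbad : pvBad ((a, b) :: tl) cnt = pvBad tl (cnt + 1) := by
              rw [pvBad, pvBad, pvDiffs_cons_ne hab]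
              have hhx : pvHasX ((a, b) :: pvDiffs tl) = pvHasX (pvDiffs tl) := by
                simp [pvHasX, List.any_cons]
                tauto
              have hdec : decide (cnt + (((a, b) :: pvDiffs tl).length : Int) > 1)
                  = decide (cnt + 1 + ((pvDiffs tl).length : Int) > 1) := by
                rw [decide_eq_decide]
                simp only [List.length_cons]
                push_cast
                omega
              rw [hhx, hdec]
            have hm : pvMerged ((a, b) :: tl) = 'X' :: pvMerged tl := by
              simp [pvMerged, hab]
            rw [hbad, hm]
            by_cases hc' : pvBad tl (cnt + 1)
            · rw [if_pos hc', if_pos hc']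
            · rw [if_neg (by simp [hc']), if_neg (by simp [hc'])]
              simp

-- zip truncates to the common prefix length
lemma zip_eq_zip_take : ∀ (a b : List Char),
    a.zip b = (a.take (min a.length b.length)).zip (b.take (min a.length b.length))
  | [], _ => by simp
  | _ :: _, [] => by simp
  | x :: xs, y :: ys => by
      simp only [List.length_cons, List.zip_cons_cons]
      rw [show min (xs.length + 1) (ys.length + 1) = min xs.length ys.length + 1 by omega]
      simp only [List.take_succ_cons, List.zip_cons_cons]
      rw [← zip_eq_zip_take xs ys]

lemma pvDiffs_zip_self : ∀ (l : List Char), pvDiffs (l.zip l) = []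
  | [] => by simp [pvDiffs]
  | x :: xs => by
      rw [List.zip_cons_cons, pvDiffs_cons_eq rfl]
      exact pvDiffs_zip_self xs

lemma pvMerged_zip_self : ∀ (l : List Char), pvMerged (l.zip l) = l
  | [] => rfl
  | x :: xs => by
      rw [List.zip_cons_cons,
        show pvMerged ((x, x) :: xs.zip xs) = x :: pvMerged (xs.zip xs) by simp [pvMerged],
        pvMerged_zip_self xs]

lemma pvDiffs_ne_nil : ∀ (a b : List Char), a.length = b.length → a ≠ b →
    pvDiffs (a.zip b) ≠ []
  | [], [], _, hne => absurd rfl hne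
  | x :: xs, y :: ys, h, hne => by
      by_cases hxy : x = y
      · subst hxy
        rw [List.zip_cons_cons, pvDiffs_cons_eq rfl]
        exact pvDiffs_ne_nil xs ys (by simpa using h) (by simpa using hne)
      · rw [List.zip_cons_cons, pvDiffs_cons_ne hxy]
        simp

-- the core correspondence between A's characterisation and B's first-mismatch algorithm
lemma core : ∀ (a b : List Char), a.length = b.length →
    (if pvBad (a.zip b) 0 then none else some (pvMerged (a.zip b))) = mergeAltCore a b
  | [], [], _ => by simp [pvBad, pvDiffs, pvHasX, pvMerged, mergeAltCore]
  | x :: xs, y :: ys, h => by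
      have hlen : xs.length = ys.length := by simpa using h
      by_cases hxy : x = y
      · subst hxy
        have hih := core xs ys hlen
        rw [List.zip_cons_cons]
        have hbad : pvBad ((x, x) :: xs.zip ys) 0 = pvBad (xs.zip ys) 0 := by
          rw [pvBad, pvBad, pvDiffs_cons_eq rfl]
        have hm : pvMerged ((x, x) :: xs.zip ys) = x :: pvMerged (xs.zip ys) := by
          simp [pvMerged]
        have hfm : firstMismatch (x :: xs) (x :: ys) = firstMismatch xs ys + 1 := by
          simp [firstMismatch]
        have hrhs : mergeAltCore (x :: xs) (x :: ys)
            = Option.map (fun l => x :: l) (mergeAltCore xs ys) := by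
          by_cases he : xs = ys
          · subst he; simp [mergeAltCore]
          · rw [mergeAltCore, mergeAltCore, hfm,
              if_neg (show ¬(x :: xs = x :: ys) by simpa using he), if_neg he]
            simp only [List.drop_succ_cons, List.getD_cons_succ, List.take_succ_cons]
            split_ifs <;> rfl
        rw [hrhs, ← hih, hbad, hm]
        by_cases hc : pvBad (xs.zip ys) 0
        · simp [hc]
        · simp [hc]
      · -- heads differ: the first mismatch is at position 0
        have hne : x :: xs ≠ y :: ys := by simp [hxy]
        have hfm : firstMismatch (x :: xs) (y :: ys) = 0 := by
          simp [firstMismatch, hxy]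
        have hR : mergeAltCore (x :: xs) (y :: ys)
            = if xs ≠ ys then none
              else if x = 'X' ∨ y = 'X' then none else some ('X' :: xs) := by
          rw [mergeAltCore, if_neg hne, hfm]
          simp only [List.drop_succ_cons, List.drop_zero, List.getD_cons_zero,
            List.take_zero, List.nil_append]
        rw [List.zip_cons_cons, hR]
        by_cases he : xs = ys
        · subst he
          rw [if_neg (show ¬(xs ≠ xs) by simp)]
          have hdiffs : pvDiffs ((x, y) :: xs.zip xs) = [(x, y)] := by
            rw [pvDiffs_cons_ne hxy, pvDiffs_zip_self]
          by_cases hX : x = 'X' ∨ y = 'X'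
          · have hLbad : pvBad ((x, y) :: xs.zip xs) 0 = true := by
              rw [pvBad, hdiffs]
              have : pvHasX [(x, y)] = true := by simp [pvHasX]; tauto
              simp [this]
            rw [if_pos hLbad, if_pos hX]
          · have hLbad : ¬ pvBad ((x, y) :: xs.zip xs) 0 = true := by
              rw [pvBad, hdiffs]
              have h1 : pvHasX [(x, y)] = false := by
                simp only [pvHasX, List.any_cons, List.any_nil, Bool.or_false,
                  Bool.or_eq_false_iff, beq_eq_false_iff_ne]
                push Not at hX
                exact ⟨hX.1, hX.2⟩
              simp [h1]
            rw [if_neg hLbad, if_neg hX]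
            have hmX : pvMerged ((x, y) :: xs.zip xs) = 'X' :: pvMerged (xs.zip xs) := by
              simp [pvMerged, hxy]
            rw [hmX, pvMerged_zip_self]
        · rw [if_pos (show xs ≠ ys from he)]
          have hLbad : pvBad ((x, y) :: xs.zip ys) 0 = true := by
            rw [pvBad, pvDiffs_cons_ne hxy]
            have hd := pvDiffs_ne_nil xs ys hlen he
            have h1 : 1 ≤ (pvDiffs (xs.zip ys)).length := by
              cases hq : pvDiffs (xs.zip ys) with
              | nil => exact absurd hq hd
              | cons _ _ => simp
            simp only [Bool.or_eq_true, decide_eq_true_eq, List.length_cons]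
            right
            push_cast
            omega
          rw [if_pos hLbad]

-- ===== VERDICT (by name: the statement is the Claim_ definition above) =====
theorem merge_spec : Claim_equal_merge := by
  intro i j _
  unfold Spec_merge merge merge_alt
  show _ = Option.map String.ofList
      (mergeAltCore (i.toList.take (min i.toList.length j.toList.length))
        (j.toList.take (min i.toList.length j.toList.length)))
  rw [mergeLoopA_eq _ _ _ (by norm_num), zip_eq_zip_take i.toList j.toList,
    ← core _ _ (by simp [List.length_take])]
  simp
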